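-- pv_equiv track=rewrite | github.com/Ryleylundeen/screen-print-color-separator | app.py | connected_component_filter
-- ===== SOURCE A (Python) =====
-- def connected_component_filter(mask, min_area):
--     h = len(mask)
--     w = len(mask[0]) if h else 0
--     visited = [[False]*w for _ in range(h)]
--     out = [[0]*w for _ in range(h)]
--     dirs = [(-1,0),(1,0),(0,-1),(0,1),(-1,-1),(1,1),(-1,1),(1,-1)]
--     for y in range(h):
--         for x in range(w):
--             if mask[y][x] == 1 and not visited[y][x]:
--                 stack = [(x,y)]
--                 comp = []
--                 visited[y][x] = True
--                 while stack:
--                     cx, cy = stack.pop()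
--                     comp.append((cx, cy))
--                     for dx, dy in dirs:
--                         nx, ny = cx+dx, cy+dy
--                         if 0 <= nx < w and 0 <= ny < h and not visited[ny][nx] and mask[ny][nx] == 1:
--                             visited[ny][nx] = True
--                             stack.append((nx, ny))
--                 if len(comp) >= min_area:
--                     for cx, cy in comp:
--                         out[cy][cx] = 1
--     return out
-- ===== SOURCE B (Python) =====
-- def connected_component_filter(mask, min_area):
--     h = len(mask)
--     w = len(mask[0]) if h else 0
--     label = [[-1] * w for _ in range(h)]
--     sizes = []
--     for y in range(h):
--         for x in range(w):
--             if mask[y][x] == 1 and label[y][x] == -1: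
--                 lid = len(sizes)
--                 label[y][x] = lid
--                 queue = [(x, y)]
--                 n = 0
--                 while n < len(queue):
--                     cx, cy = queue[n]
--                     n += 1
--                     for ny in (cy - 1, cy, cy + 1):
--                         for nx in (cx - 1, cx, cx + 1):
--                             if 0 <= nx < w and 0 <= ny < h and label[ny][nx] == -1 and mask[ny][nx] == 1:
--                                 label[ny][nx] = lid
--                                 queue.append((nx, ny))
--                 sizes.append(len(queue))
--     return [[1 if label[y][x] >= 0 and sizes[label[y][x]] >= min_area else 0
--              for x in range(w)] for y in range(h)]
-- ===== Notes on version B (the rewrite author's own statement) =====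
-- stated objective: alternative
-- what changed: Replaces the per-component LIFO stack/visited/immediate-write flood fill by a FIFO pointer-queue labeling pass that assigns integer component ids into a label grid and records component sizes in a side list, with the output produced afterwards by a single comprehension looking up each pixel's component size; Pre_ excludes only ragged masks (a row shorter than the first) on which both programs raise IndexError.
import Mathlib
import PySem

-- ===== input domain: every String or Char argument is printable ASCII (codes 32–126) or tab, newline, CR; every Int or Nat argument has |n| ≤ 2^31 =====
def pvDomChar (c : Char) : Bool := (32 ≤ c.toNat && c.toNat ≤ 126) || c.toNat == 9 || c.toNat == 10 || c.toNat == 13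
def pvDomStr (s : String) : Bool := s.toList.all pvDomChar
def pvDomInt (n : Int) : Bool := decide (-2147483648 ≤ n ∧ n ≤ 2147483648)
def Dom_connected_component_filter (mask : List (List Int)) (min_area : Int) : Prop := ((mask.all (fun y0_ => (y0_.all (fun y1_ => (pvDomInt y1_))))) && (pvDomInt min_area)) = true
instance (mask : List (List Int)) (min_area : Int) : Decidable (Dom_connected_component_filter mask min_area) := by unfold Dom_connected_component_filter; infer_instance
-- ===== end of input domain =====

-- B replaces A's per-component stack flood fill by a FIFO labeling pass with a label grid and a
-- component-size list, building the output in a final comprehension (alternative decomposition, same cost).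


-- ===== PORT A =====
-- 2-D read/write with the Int indices the Python code uses; every access in either program is guarded
-- by 0 ≤ i < bound first, so the `.toNat`/`getD` forms below are exact on every executed access.
def pvGet2 {α : Type} (d : α) (m : List (List α)) (y x : Int) : α :=
  (m.getD y.toNat []).getD x.toNat d

def pvSet2 {α : Type} (m : List (List α)) (y x : Int) (v : α) : List (List α) :=
  m.set y.toNat ((m.getD y.toNat []).set x.toNat v)

def pvDirsA : List (Int × Int) := [(-1,0),(1,0),(0,-1),(0,1),(-1,-1),(1,1),(-1,1),(1,-1)]

-- one neighbour test of A's inner `for dx, dy in dirs` body (push on the LIFO stack = cons)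
def pvPushCA (mask : List (List Int)) (h w : Int)
    (st : List (List Bool) × List (Int × Int)) (n : Int × Int) :
    List (List Bool) × List (Int × Int) :=
  if 0 ≤ n.1 ∧ n.1 < w ∧ 0 ≤ n.2 ∧ n.2 < h ∧
      pvGet2 false st.1 n.2 n.1 = false ∧ pvGet2 0 mask n.2 n.1 = 1
  then (pvSet2 st.1 n.2 n.1 true, n :: st.2)
  else st

-- A's `while stack:` loop; the Python stack pops from the END, modelled as head-pop with cons-push.
-- fuel = 2*h*w+1 always suffices (each iteration pops one element and every push marks a fresh cell).
def pvLoopA (mask : List (List Int)) (h w : Int) :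
    Nat → List (List Bool) → List (Int × Int) → List (Int × Int) →
    List (List Bool) × List (Int × Int)
  | 0, V, _, comp => (V, comp)
  | _ + 1, V, [], comp => (V, comp)
  | fuel + 1, V, c :: rest, comp =>
    let st := (pvDirsA.map (fun d => (c.1 + d.1, c.2 + d.2))).foldl (pvPushCA mask h w) (V, rest)
    pvLoopA mask h w fuel st.1 st.2 (comp ++ [c])

def connected_component_filter (mask : List (List Int)) (min_area : Int) : List (List Int) :=
  let h : Int := mask.length
  let w : Int := if mask.length ≠ 0 then (mask.headD []).length else 0
  let visited : List (List Bool) := List.replicate mask.length (List.replicate w.toNat false)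
  let out0 : List (List Int) := List.replicate mask.length (List.replicate w.toNat 0)
  let fin := (PySem.List.pyRange 0 h 1).foldl (fun st y =>
    (PySem.List.pyRange 0 w 1).foldl (fun (st : List (List Int) × List (List Bool)) x =>
      if pvGet2 0 mask y x = 1 ∧ pvGet2 false st.2 y x = false then
        let V1 := pvSet2 st.2 y x true
        let r := pvLoopA mask h w (2 * mask.length * w.toNat + 1) V1 [(x, y)] []
        let out' := if min_area ≤ (r.2.length : Int)
          then r.2.foldl (fun o c => pvSet2 o c.2 c.1 1) st.1
          else st.1
        (out', r.1)
      else st) st) (out0, visited)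
  fin.1

-- ===== PORT B =====
-- one neighbour test of B's `for ny …: for nx …:` body (push at the END of the FIFO queue)
def pvPushCB (mask : List (List Int)) (h w lid : Int)
    (st : List (List Int) × List (Int × Int)) (n : Int × Int) :
    List (List Int) × List (Int × Int) :=
  if 0 ≤ n.1 ∧ n.1 < w ∧ 0 ≤ n.2 ∧ n.2 < h ∧
      pvGet2 (-1) st.1 n.2 n.1 = -1 ∧ pvGet2 0 mask n.2 n.1 = 1
  then (pvSet2 st.1 n.2 n.1 lid, st.2 ++ [n])
  else st

-- B's `while n < len(queue)` loop: state = (label grid, unread queue suffix, count of read cells);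
-- the returned count is Python's final len(queue).  Same always-sufficient fuel as A's loop.
def pvLoopB (mask : List (List Int)) (h w lid : Int) :
    Nat → List (List Int) → List (Int × Int) → Nat →
    List (List Int) × Nat
  | 0, L, _, cnt => (L, cnt)
  | _ + 1, L, [], cnt => (L, cnt)
  | fuel + 1, L, c :: rest, cnt =>
    let st := ([c.2 - 1, c.2, c.2 + 1].flatMap (fun ny =>
        [c.1 - 1, c.1, c.1 + 1].map (fun nx => (nx, ny)))).foldl (pvPushCB mask h w lid) (L, rest)
    pvLoopB mask h w lid fuel st.1 st.2 (cnt + 1)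

def connected_component_filter_alt (mask : List (List Int)) (min_area : Int) : List (List Int) :=
  let h : Int := mask.length
  let w : Int := if mask.length ≠ 0 then (mask.headD []).length else 0
  let label0 : List (List Int) := List.replicate mask.length (List.replicate w.toNat (-1))
  let fin := (PySem.List.pyRange 0 h 1).foldl (fun st y =>
    (PySem.List.pyRange 0 w 1).foldl (fun (st : List (List Int) × List Int) x =>
      if pvGet2 0 mask y x = 1 ∧ pvGet2 (-1) st.1 y x = -1 then
        let lid : Int := st.2.length
        let L1 := pvSet2 st.1 y x lid
        let r := pvLoopB mask (mask.length) w lid (2 * mask.length * w.toNat + 1) L1 [(x, y)] 0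
        (r.1, st.2 ++ [(r.2 : Int)])
      else st) st) (label0, [])
  (PySem.List.pyRange 0 h 1).map (fun y =>
    (PySem.List.pyRange 0 w 1).map (fun x =>
      if 0 ≤ pvGet2 (-1) fin.1 y x ∧ min_area ≤ fin.2.getD (pvGet2 (-1) fin.1 y x).toNat 0
      then (1 : Int) else 0))

-- ===== PRECONDITION & SPEC =====
-- Pre_ excludes exactly the ragged masks (some row shorter than the first row) on which the Python
-- programs raise IndexError while scanning; on every other input both return normally.
def Pre_connected_component_filter (mask : List (List Int)) (min_area : Int) : Prop :=
  ∀ r ∈ mask, (mask.headD []).length ≤ r.length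
instance (mask : List (List Int)) (min_area : Int) : Decidable (Pre_connected_component_filter mask min_area) := by unfold Pre_connected_component_filter; infer_instance

def pvWitness_connected_component_filter : List (List Int) × Int := ([[1, 0, 1], [0, 1, 0]], 2)

def Spec_connected_component_filter (mask : List (List Int)) (min_area : Int) (out : List (List Int)) : Prop := out = connected_component_filter_alt mask min_area
instance (mask : List (List Int)) (min_area : Int) (out : List (List Int)) : Decidable (Spec_connected_component_filter mask min_area out) := by unfold Spec_connected_component_filter; infer_instance

-- ===== CLAIM (what is proved, stated in full; the proofs are below) =====
def Claim_equal_connected_component_filter : Prop := ∀ (mask : List (List Int)) (min_area : Int), Dom_connected_component_filter mask min_area → Pre_connected_component_filter mask min_area → Spec_connected_component_filter mask min_area (connected_component_filter mask min_area)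

-- ===== LEMMAS AND PROOFS =====
-- grid geometry used by the proofs
def pvInG (H W : Nat) (c : Int × Int) : Prop :=
  0 ≤ c.1 ∧ c.1 < (W : Int) ∧ 0 ≤ c.2 ∧ c.2 < (H : Int)

def pvAdj (c n : Int × Int) : Prop :=
  (n.1 = c.1 - 1 ∨ n.1 = c.1 ∨ n.1 = c.1 + 1) ∧ (n.2 = c.2 - 1 ∨ n.2 = c.2 ∨ n.2 = c.2 + 1)

def pvRect {α : Type} (m : List (List α)) (H W : Nat) : Prop :=
  m.length = H ∧ ∀ r ∈ m, r.length = W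

-- cells reachable from S through unmarked (¬ P) in-grid foreground cells
inductive pvReach (mask : List (List Int)) (H W : Nat) (P : Int × Int → Prop)
    (S : List (Int × Int)) : Int × Int → Prop
  | base {c} : c ∈ S → pvReach mask H W P S c
  | step {c n} : pvReach mask H W P S c → pvAdj c n → pvInG H W n →
      pvGet2 0 mask n.2 n.1 = 1 → ¬ P n → pvReach mask H W P S n

theorem pvCountP_set {α : Type} (p : α → Bool) (l : List α) :
    ∀ (i : Nat) (v : α), i < l.length →
    (l.set i v).countP p + (if p (l.getD i v) then 1 else 0)
      = l.countP p + (if p v then 1 else 0) := by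
  induction l with
  | nil => intro i v h; simp at h
  | cons a t ih =>
    intro i v h
    cases i with
    | zero => simp [List.countP_cons]; split_ifs <;> omega
    | succ j =>
      simp only [List.set_cons_succ, List.countP_cons, List.getD_cons_succ]
      have := ih j v (by simpa using h)
      split_ifs at this ⊢ <;> omega

theorem pvSum_set (l : List Nat) : ∀ (i : Nat) (v : Nat), i < l.length →
    (l.set i v).sum + l.getD i v = l.sum + v := by
  induction l with
  | nil => intro i v h; simp at h
  | cons a t ih =>
    intro i v h
    cases i with
    | zero => simp; omega
    | succ j =>
      simp only [List.set_cons_succ, List.sum_cons, List.getD_cons_succ]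
      have := ih j v (by simpa using h)
      omega

theorem pvRect_set2 {α : Type} {m : List (List α)} {H W : Nat} (hm : pvRect m H W)
    (y x : Int) (v : α) : pvRect (pvSet2 m y x v) H W := by
  obtain ⟨hlen, hrow⟩ := hm
  by_cases hy : y.toNat < m.length
  · refine ⟨by simpa [pvSet2] using hlen, ?_⟩
    intro r hr
    rcases List.mem_or_eq_of_mem_set hr with h | h
    · exact hrow r h
    · subst h
      have : (m.getD y.toNat []).length = W := by
        rw [List.getD_eq_getElem _ _ hy]; exact hrow _ (List.getElem_mem hy)
      simpa using this
  · have : pvSet2 m y x v = m := List.set_eq_of_length_le (Nat.le_of_not_lt hy)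
    rw [this]; exact ⟨hlen, hrow⟩

theorem pvGet2_row {α : Type} (d : α) {m : List (List α)} {H W : Nat}
    (hm : pvRect m H W) {y x : Int} (hy : 0 ≤ y) (hy2 : y < (H : Int)) (v : α) :
    (pvSet2 m y x v).getD y.toNat [] = (m.getD y.toNat []).set x.toNat v := by
  have hyl : y.toNat < m.length := by rw [hm.1]; omega
  unfold pvSet2
  rw [List.getD_eq_getElem?_getD, List.getElem?_set_self hyl]
  rfl

theorem pvRow_len {α : Type} {m : List (List α)} {H W : Nat}
    (hm : pvRect m H W) {y : Int} (hy : 0 ≤ y) (hy2 : y < (H : Int)) :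
    (m.getD y.toNat []).length = W := by
  have hyl : y.toNat < m.length := by rw [hm.1]; omega
  rw [List.getD_eq_getElem _ _ hyl]; exact hm.2 _ (List.getElem_mem hyl)

theorem pvGet2_set2_self {α : Type} (d : α) {m : List (List α)} {H W : Nat}
    (hm : pvRect m H W) {y x : Int} (hy : 0 ≤ y) (hy2 : y < (H : Int))
    (hx : 0 ≤ x) (hx2 : x < (W : Int)) (v : α) :
    pvGet2 d (pvSet2 m y x v) y x = v := by
  have hxl : x.toNat < (m.getD y.toNat []).length := by
    rw [pvRow_len hm hy hy2]; omega
  unfold pvGet2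
  rw [pvGet2_row d hm hy hy2 v, List.getD_eq_getElem?_getD, List.getElem?_set_self hxl]
  rfl

theorem pvGet2_set2_ne {α : Type} (d : α) {m : List (List α)} {H W : Nat}
    (hm : pvRect m H W) {y x y' x' : Int} (hy : 0 ≤ y) (hy2 : y < (H : Int))
    (hx : 0 ≤ x) (hx2 : x < (W : Int)) (hy' : 0 ≤ y') (hx' : 0 ≤ x')
    (hne : ¬ (y' = y ∧ x' = x)) (v : α) :
    pvGet2 d (pvSet2 m y x v) y' x' = pvGet2 d m y' x' := by
  unfold pvGet2
  by_cases hyy : y'.toNat = y.toNat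
  · have hyy' : y' = y := by omega
    have hxx : x'.toNat ≠ x.toNat := by
      subst hyy'; intro hc; exact hne ⟨rfl, by omega⟩
    rw [hyy, pvGet2_row d hm hy hy2 v]
    rw [List.getD_eq_getElem?_getD, List.getElem?_set_ne (by omega),
        ← List.getD_eq_getElem?_getD]
  · unfold pvSet2
    rw [List.getD_eq_getElem?_getD (l := m.set _ _), List.getElem?_set_ne (by omega),
        ← List.getD_eq_getElem?_getD]
def pvCnt {α : Type} (p : α → Bool) (m : List (List α)) : Nat :=
  (m.map (fun r => r.countP p)).sum

theorem pvCnt_set2 {α : Type} (d : α) (p : α → Bool) {m : List (List α)} {H W : Nat}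
    (hm : pvRect m H W) {y x : Int} (hy : 0 ≤ y) (hy2 : y < (H : Int))
    (hx : 0 ≤ x) (hx2 : x < (W : Int)) {v : α}
    (hold : p (pvGet2 d m y x) = true) (hv : p v = false) :
    pvCnt p (pvSet2 m y x v) + 1 = pvCnt p m := by
  have hyl : y.toNat < m.length := by rw [hm.1]; omega
  have hxl : x.toNat < (m.getD y.toNat []).length := by rw [pvRow_len hm hy hy2]; omega
  have hrow : p ((m.getD y.toNat []).getD x.toNat v) = true := by
    rw [List.getD_eq_getElem _ _ hxl]
    rw [show ((m.getD y.toNat []))[x.toNat] = pvGet2 d m y x by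
      unfold pvGet2; rw [List.getD_eq_getElem _ _ hxl]]
    exact hold
  have hcp := pvCountP_set p (m.getD y.toNat []) x.toNat v hxl
  rw [if_pos hrow, if_neg (by simp [hv])] at hcp
  unfold pvCnt pvSet2
  rw [List.map_set]
  have hyl' : y.toNat < (m.map (fun r => r.countP p)).length := by simpa using hyl
  have hsum := pvSum_set (m.map (fun r => r.countP p)) y.toNat
      (((m.getD y.toNat []).set x.toNat v).countP p) hyl'
  have hgd : (m.map (fun r => r.countP p)).getD y.toNat (((m.getD y.toNat []).set x.toNat v).countP p)
      = (m.getD y.toNat []).countP p := by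
    rw [List.getD_eq_getElem _ _ hyl', List.getElem_map, List.getD_eq_getElem _ _ hyl]
  rw [hgd] at hsum
  omega

theorem pvCnt_le {α : Type} (p : α → Bool) {m : List (List α)} {H W : Nat}
    (hm : pvRect m H W) : pvCnt p m ≤ H * W := by
  obtain ⟨hlen, hrow⟩ := hm
  subst hlen
  unfold pvCnt
  induction m with
  | nil => simp
  | cons r t ih =>
    simp only [List.map_cons, List.sum_cons, List.length_cons]
    have h1 : r.countP p ≤ W := by
      rw [← hrow r (by simp)]; exact List.countP_le_length
    have h2 := ih (fun r hr => hrow r (by simp [hr]))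
    calc r.countP p + (t.map (fun r => r.countP p)).sum ≤ W + t.length * W := by omega
      _ = (t.length + 1) * W := by ring
  
theorem pvRect_replicate {α : Type} (H W : Nat) (v : α) :
    pvRect (List.replicate H (List.replicate W v)) H W := by
  constructor
  · simp
  · intro r hr; rw [List.eq_of_mem_replicate hr]; simp

theorem pvGet2_replicate {α : Type} (d : α) {H W : Nat} {y x : Int}
    (hy : 0 ≤ y) (hy2 : y < (H : Int)) (hx : 0 ≤ x) (hx2 : x < (W : Int)) (v : α) :
    pvGet2 d (List.replicate H (List.replicate W v)) y x = v := by
  unfold pvGet2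
  rw [List.getD_replicate _ (by omega), List.getD_replicate _ (by omega)]

theorem pvReach_nil {mask : List (List Int)} {H W : Nat} {P : Int × Int → Prop} {z : Int × Int} :
    ¬ pvReach mask H W P [] z := by
  intro h
  induction h with
  | base h => simp at h
  | step _ _ _ _ _ ih => exact ih

theorem pvReach_mem_or_not {mask : List (List Int)} {H W : Nat} {P : Int × Int → Prop}
    {S : List (Int × Int)} {z : Int × Int} (h : pvReach mask H W P S z) : z ∈ S ∨ ¬ P z := by
  induction h with
  | base h => exact .inl h
  | step _ _ _ _ hp _ => exact .inr hp

theorem pvReach_mem_or_inG {mask : List (List Int)} {H W : Nat} {P : Int × Int → Prop}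
    {S : List (Int × Int)} {z : Int × Int} (h : pvReach mask H W P S z) : z ∈ S ∨ pvInG H W z := by
  induction h with
  | base h => exact .inl h
  | step _ _ hin _ _ _ => exact .inr hin

theorem pvReach_congr {mask : List (List Int)} {H W : Nat} {P Q : Int × Int → Prop}
    {S T : List (Int × Int)} (hPQ : ∀ u, pvInG H W u → (P u ↔ Q u))
    (hST : ∀ u, u ∈ S → u ∈ T) {z : Int × Int} (h : pvReach mask H W P S z) :
    pvReach mask H W Q T z := by
  induction h with
  | base h => exact .base (hST _ h)
  | step hr hadj hin hfg hp ih => exact .step ih hadj hin hfg (fun hq => hp ((hPQ _ hin).2 hq))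

theorem pvReach_transfer {mask : List (List Int)} {H W : Nat} {P P' : Int × Int → Prop}
    {c : Int × Int} {rest S' news : List (Int × Int)}
    (hSP : ∀ z ∈ c :: rest, P z) (hSin : ∀ z ∈ c :: rest, pvInG H W z)
    (hnews : ∀ n, n ∈ news ↔ pvAdj c n ∧ pvInG H W n ∧ pvGet2 0 mask n.2 n.1 = 1 ∧ ¬ P n)
    (hP' : ∀ z, pvInG H W z → (P' z ↔ P z ∨ z ∈ news))
    (hS' : ∀ z, z ∈ S' ↔ z ∈ rest ∨ z ∈ news) :
    ∀ z, pvInG H W z →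
      ((P z ∨ pvReach mask H W P (c :: rest) z) ↔ (P' z ∨ pvReach mask H W P' S' z)) := by
  have hnewsIn : ∀ n ∈ news, pvInG H W n := fun n hn => ((hnews n).1 hn).2.1
  have hS'in : ∀ z ∈ S', pvInG H W z := by
    intro z hz
    rcases (hS' z).1 hz with h | h
    · exact hSin z (by simp [h])
    · exact hnewsIn z h
  have hnewsReach : ∀ n ∈ news, pvReach mask H W P (c :: rest) n := by
    intro n hn
    obtain ⟨hadj, hin, hfg, hnp⟩ := (hnews n).1 hn
    exact .step (.base (by simp)) hadj hin hfg hnp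
  have fwd : ∀ z, pvReach mask H W P (c :: rest) z → (P' z ∨ pvReach mask H W P' S' z) := by
    intro z hz
    induction hz with
    | base h => exact .inl ((hP' _ (hSin _ h)).2 (.inl (hSP _ h)))
    | @step c' n hr hadj hin hfg hnp ih =>
      by_cases hn : n ∈ news
      · exact .inl ((hP' n hin).2 (.inr hn))
      · have hnP'n : ¬ P' n := fun h => by
          rcases (hP' n hin).1 h with h | h
          · exact hnp h
          · exact hn h
        have hinc' : pvInG H W c' := by
          rcases pvReach_mem_or_inG hr with h | h
          · exact hSin _ h
          · exact h
        rcases ih with hP'c' | hRc'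
        · rcases (hP' c' hinc').1 hP'c' with hPc' | hc'news
          · rcases pvReach_mem_or_not hr with hmem | hnp'
            · rcases List.mem_cons.1 hmem with hcc | hrest
              · exfalso
                apply hn
                rw [hnews]
                exact ⟨hcc ▸ hadj, hin, hfg, hnp⟩
              · exact .inr (.step (.base ((hS' c').2 (.inl hrest))) hadj hin hfg hnP'n)
            · exact absurd hPc' hnp'
          · exact .inr (.step (.base ((hS' c').2 (.inr hc'news))) hadj hin hfg hnP'n)
        · exact .inr (.step hRc' hadj hin hfg hnP'n)
  have bwd : ∀ z, pvReach mask H W P' S' z → (P z ∨ pvReach mask H W P (c :: rest) z) := by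
    intro z hz
    induction hz with
    | base h =>
      rcases (hS' _).1 h with hrest | hnew
      · exact .inr (.base (by simp [hrest]))
      · exact .inr (hnewsReach _ hnew)
    | @step c' n hr hadj hin hfg hnp' ih =>
      have hnP : ¬ P n := fun h => hnp' ((hP' n hin).2 (.inl h))
      rcases ih with hPc' | hRc'
      · have hinc' : pvInG H W c' := by
          rcases pvReach_mem_or_inG hr with h | h
          · exact hS'in _ h
          · exact h
        have hP'c' : P' c' := (hP' c' hinc').2 (.inl hPc')
        have hc'S' : c' ∈ S' := by
          rcases pvReach_mem_or_not hr with h | h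
          · exact h
          · exact absurd hP'c' h
        rcases (hS' c').1 hc'S' with hrest | hnew
        · exact .inr (.step (.base (by simp [hrest])) hadj hin hfg hnP)
        · exact .inr (.step (hnewsReach _ hnew) hadj hin hfg hnP)
      · exact .inr (.step hRc' hadj hin hfg hnP)
  intro z hz
  constructor
  · rintro (h | h)
    · exact .inl ((hP' z hz).2 (.inl h))
    · exact fwd z h
  · rintro (h | h)
    · rcases (hP' z hz).1 h with h | h
      · exact .inl h
      · exact .inr (hnewsReach _ h)
    · exact bwd z h
theorem pvMemImagesA (c n : Int × Int) :
    n ∈ pvDirsA.map (fun d => (c.1 + d.1, c.2 + d.2)) ↔ (pvAdj c n ∧ n ≠ c) := by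
  simp only [pvDirsA, List.map_cons, List.map_nil, List.mem_cons, List.not_mem_nil,
    or_false, pvAdj, Prod.ext_iff, ne_eq, not_and_or]
  omega

theorem pvNodupImagesA (c : Int × Int) :
    (pvDirsA.map (fun d => (c.1 + d.1, c.2 + d.2))).Nodup := by
  simp [pvDirsA, Prod.ext_iff]

theorem pvMemImagesB (c n : Int × Int) :
    n ∈ ([c.2 - 1, c.2, c.2 + 1].flatMap (fun ny =>
        [c.1 - 1, c.1, c.1 + 1].map (fun nx => (nx, ny)))) ↔ pvAdj c n := by
  simp only [List.flatMap_cons, List.flatMap_nil, List.map_cons, List.map_nil,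
    List.append_nil, List.mem_append, List.mem_cons, List.not_mem_nil, or_false,
    pvAdj, Prod.ext_iff]
  omega

theorem pvNodupImagesB (c : Int × Int) :
    ([c.2 - 1, c.2, c.2 + 1].flatMap (fun ny =>
        [c.1 - 1, c.1, c.1 + 1].map (fun nx => (nx, ny)))).Nodup := by
  show List.Nodup [(c.1-1,c.2-1),(c.1,c.2-1),(c.1+1,c.2-1),(c.1-1,c.2),(c.1,c.2),
    (c.1+1,c.2),(c.1-1,c.2+1),(c.1,c.2+1),(c.1+1,c.2+1)]
  simp [Prod.ext_iff]
  omega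

theorem pvFoldA_spec (mask : List (List Int)) (H W : Nat) :
    ∀ (cands : List (Int × Int)) (V : List (List Bool)) (S0 : List (Int × Int)),
    cands.Nodup → pvRect V H W →
    ∃ (V1 : List (List Bool)) (ns : List (Int × Int)), cands.foldl (pvPushCA mask (H : Int) (W : Int)) (V, S0) = (V1, ns.reverse ++ S0) ∧
      pvRect V1 H W ∧ ns.Nodup ∧
      (∀ n, n ∈ ns ↔ n ∈ cands ∧ pvInG H W n ∧ pvGet2 0 mask n.2 n.1 = 1 ∧
        pvGet2 false V n.2 n.1 = false) ∧
      (∀ z, pvInG H W z →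
        (pvGet2 false V1 z.2 z.1 = true ↔ pvGet2 false V z.2 z.1 = true ∨ z ∈ ns)) ∧
      pvCnt (fun b => b = false) V1 + ns.length = pvCnt (fun b => b = false) V := by
  intro cands
  induction cands with
  | nil =>
    intro V S0 _ hV
    exact ⟨V, [], by simp, hV, by simp, by simp, by simp, by simp⟩
  | cons a t ih =>
    intro V S0 hnd hV
    have hat : a ∉ t := (List.nodup_cons.1 hnd).1
    have hndt : t.Nodup := (List.nodup_cons.1 hnd).2
    simp only [List.foldl_cons]
    by_cases hcond : 0 ≤ a.1 ∧ a.1 < (W : Int) ∧ 0 ≤ a.2 ∧ a.2 < (H : Int) ∧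
        pvGet2 false V a.2 a.1 = false ∧ pvGet2 0 mask a.2 a.1 = 1
    · have hstep : pvPushCA mask (H : Int) (W : Int) (V, S0) a
          = (pvSet2 V a.2 a.1 true, a :: S0) := by
        unfold pvPushCA; rw [if_pos hcond]
      rw [hstep]
      have haG : pvInG H W a := ⟨hcond.1, hcond.2.1, hcond.2.2.1, hcond.2.2.2.1⟩
      have hV1a : pvRect (pvSet2 V a.2 a.1 true) H W := pvRect_set2 hV _ _ _
      obtain ⟨V1, ns', hfold, hrect, hnd', hmem, hmark, hcntr⟩ := ih (pvSet2 V a.2 a.1 true) (a :: S0) hndt hV1a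
      have hgetne : ∀ z, pvInG H W z → z ≠ a →
          pvGet2 false (pvSet2 V a.2 a.1 true) z.2 z.1 = pvGet2 false V z.2 z.1 := by
        intro z hz hza
        exact pvGet2_set2_ne false hV haG.2.2.1 haG.2.2.2 haG.1 haG.2.1 hz.2.2.1 hz.1
          (fun hc => hza (Prod.ext hc.2 hc.1)) true
      have hgeta : pvGet2 false (pvSet2 V a.2 a.1 true) a.2 a.1 = true :=
        pvGet2_set2_self false hV haG.2.2.1 haG.2.2.2 haG.1 haG.2.1 true
      have hans' : a ∉ ns' := by
        intro hc
        have := ((hmem a).1 hc).1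
        exact hat this
      refine ⟨V1, a :: ns', ?_, hrect, ?_, ?_, ?_, ?_⟩
      · rw [hfold, List.reverse_cons, List.append_assoc]; rfl
      · exact List.nodup_cons.2 ⟨hans', hnd'⟩
      · intro n
        by_cases hna : n = a
        · subst hna
          simp only [List.mem_cons]
          constructor
          · intro _; exact ⟨.inl (by simp), haG, hcond.2.2.2.2.2, hcond.2.2.2.2.1⟩
          · intro _; exact .inl (by simp)
        · simp only [List.mem_cons]
          rw [hmem n]
          constructor
          · rintro (hc | ⟨hnt, hg, hf, hu⟩)
            · exact absurd hc hna
            · exact ⟨.inr hnt, hg, hf, by rw [← hgetne n hg hna]; exact hu⟩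
          · rintro ⟨hc | hnt, hg, hf, hu⟩
            · exact absurd hc hna
            · exact .inr ⟨hnt, hg, hf, by rw [hgetne n hg hna]; exact hu⟩
      · intro z hz
        rw [hmark z hz]
        by_cases hza : z = a
        · subst hza
          simp [hgeta]
        · rw [hgetne z hz hza]
          simp only [List.mem_cons]
          constructor
          · rintro (h | h)
            · exact .inl h
            · exact .inr (.inr h)
          · rintro (h | h | h)
            · exact .inl h
            · exact absurd h hza
            · exact .inr h
      · have hsets : pvCnt (fun b => b = false) (pvSet2 V a.2 a.1 true) + 1
            = pvCnt (fun b => b = false) V := by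
          apply pvCnt_set2 false _ hV haG.2.2.1 haG.2.2.2 haG.1 haG.2.1
          · simp [hcond.2.2.2.2.1]
          · simp
        simp only [List.length_cons]
        omega
    · have hstep : pvPushCA mask (H : Int) (W : Int) (V, S0) a = (V, S0) := by
        unfold pvPushCA; rw [if_neg hcond]
      rw [hstep]
      obtain ⟨V1, ns', hfold, hrect, hnd', hmem, hmark, hcntr⟩ := ih V S0 hndt hV
      refine ⟨V1, ns', hfold, hrect, hnd', ?_, hmark, hcntr⟩
      intro n
      rw [hmem n]
      by_cases hna : n = a
      · subst hna
        simp only [List.mem_cons]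
        constructor
        · intro ⟨hnt, _⟩; exact absurd hnt hat
        · rintro ⟨_, hg, hf, hu⟩
          exact absurd ⟨hg.1, hg.2.1, hg.2.2.1, hg.2.2.2, hu, hf⟩ hcond
      · simp only [List.mem_cons]
        constructor
        · rintro ⟨hnt, hrest⟩; exact ⟨.inr hnt, hrest⟩
        · rintro ⟨hc | hnt, hrest⟩
          · exact absurd hc hna
          · exact ⟨hnt, hrest⟩

theorem pvFoldB_spec (mask : List (List Int)) (H W : Nat) (lid : Int) (hlid : lid ≠ -1) :
    ∀ (cands : List (Int × Int)) (L : List (List Int)) (S0 : List (Int × Int)),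
    cands.Nodup → pvRect L H W →
    ∃ (L1 : List (List Int)) (ns : List (Int × Int)), cands.foldl (pvPushCB mask (H : Int) (W : Int) lid) (L, S0) = (L1, S0 ++ ns) ∧
      pvRect L1 H W ∧ ns.Nodup ∧
      (∀ n, n ∈ ns ↔ n ∈ cands ∧ pvInG H W n ∧ pvGet2 0 mask n.2 n.1 = 1 ∧
        pvGet2 (-1) L n.2 n.1 = -1) ∧
      (∀ z, pvInG H W z →
        pvGet2 (-1) L1 z.2 z.1 = (if z ∈ ns then lid else pvGet2 (-1) L z.2 z.1)) ∧
      pvCnt (fun v => v = -1) L1 + ns.length = pvCnt (fun v => v = -1) L := by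
  intro cands
  induction cands with
  | nil =>
    intro L S0 _ hL
    exact ⟨L, [], by simp, hL, by simp, by simp, by simp, by simp⟩
  | cons a t ih =>
    intro L S0 hnd hL
    have hat : a ∉ t := (List.nodup_cons.1 hnd).1
    have hndt : t.Nodup := (List.nodup_cons.1 hnd).2
    simp only [List.foldl_cons]
    by_cases hcond : 0 ≤ a.1 ∧ a.1 < (W : Int) ∧ 0 ≤ a.2 ∧ a.2 < (H : Int) ∧
        pvGet2 (-1) L a.2 a.1 = -1 ∧ pvGet2 0 mask a.2 a.1 = 1
    · have hstep : pvPushCB mask (H : Int) (W : Int) lid (L, S0) a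
          = (pvSet2 L a.2 a.1 lid, S0 ++ [a]) := by
        unfold pvPushCB; rw [if_pos hcond]
      rw [hstep]
      have haG : pvInG H W a := ⟨hcond.1, hcond.2.1, hcond.2.2.1, hcond.2.2.2.1⟩
      have hL1a : pvRect (pvSet2 L a.2 a.1 lid) H W := pvRect_set2 hL _ _ _
      obtain ⟨L1, ns', hfold, hrect, hnd', hmem, hval, hcntr⟩ := ih (pvSet2 L a.2 a.1 lid) (S0 ++ [a]) hndt hL1a
      have hgetne : ∀ z, pvInG H W z → z ≠ a →
          pvGet2 (-1) (pvSet2 L a.2 a.1 lid) z.2 z.1 = pvGet2 (-1) L z.2 z.1 := by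
        intro z hz hza
        exact pvGet2_set2_ne (-1) hL haG.2.2.1 haG.2.2.2 haG.1 haG.2.1 hz.2.2.1 hz.1
          (fun hc => hza (Prod.ext hc.2 hc.1)) lid
      have hgeta : pvGet2 (-1) (pvSet2 L a.2 a.1 lid) a.2 a.1 = lid :=
        pvGet2_set2_self (-1) hL haG.2.2.1 haG.2.2.2 haG.1 haG.2.1 lid
      have hans' : a ∉ ns' := fun hc => hat ((hmem a).1 hc).1
      refine ⟨L1, a :: ns', ?_, hrect, ?_, ?_, ?_, ?_⟩
      · rw [hfold, List.append_assoc]; rfl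
      · exact List.nodup_cons.2 ⟨hans', hnd'⟩
      · intro n
        by_cases hna : n = a
        · subst hna
          simp only [List.mem_cons]
          constructor
          · intro _; exact ⟨.inl (by simp), haG, hcond.2.2.2.2.2, hcond.2.2.2.2.1⟩
          · intro _; exact .inl (by simp)
        · simp only [List.mem_cons]
          rw [hmem n]
          constructor
          · rintro (hc | ⟨hnt, hg, hf, hu⟩)
            · exact absurd hc hna
            · exact ⟨.inr hnt, hg, hf, by rw [← hgetne n hg hna]; exact hu⟩
          · rintro ⟨hc | hnt, hg, hf, hu⟩
            · exact absurd hc hna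
            · exact .inr ⟨hnt, hg, hf, by rw [hgetne n hg hna]; exact hu⟩
      · intro z hz
        rw [hval z hz]
        by_cases hza : z = a
        · subst hza
          simp [hgeta, hans']
        · rw [hgetne z hz hza]
          by_cases hzn : z ∈ ns'
          · simp [hzn, List.mem_cons, hza]
          · simp [hzn, List.mem_cons, hza]
      · have hsets : pvCnt (fun v => v = -1) (pvSet2 L a.2 a.1 lid) + 1
            = pvCnt (fun v => v = -1) L := by
          apply pvCnt_set2 (-1) _ hL haG.2.2.1 haG.2.2.2 haG.1 haG.2.1
          · simp [hcond.2.2.2.2.1]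
          · simp [hlid]
        simp only [List.length_cons]
        omega
    · have hstep : pvPushCB mask (H : Int) (W : Int) lid (L, S0) a = (L, S0) := by
        unfold pvPushCB; rw [if_neg hcond]
      rw [hstep]
      obtain ⟨L1, ns', hfold, hrect, hnd', hmem, hval, hcntr⟩ := ih L S0 hndt hL
      refine ⟨L1, ns', hfold, hrect, hnd', ?_, hval, hcntr⟩
      intro n
      rw [hmem n]
      by_cases hna : n = a
      · subst hna
        simp only [List.mem_cons]
        constructor
        · intro ⟨hnt, _⟩; exact absurd hnt hat
        · rintro ⟨_, hg, hf, hu⟩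
          exact absurd ⟨hg.1, hg.2.1, hg.2.2.1, hg.2.2.2, hu, hf⟩ hcond
      · simp only [List.mem_cons]
        constructor
        · rintro ⟨hnt, hrest⟩; exact ⟨.inr hnt, hrest⟩
        · rintro ⟨hc | hnt, hrest⟩
          · exact absurd hc hna
          · exact ⟨hnt, hrest⟩
theorem pvLoopA_spec (mask : List (List Int)) (H W : Nat) :
    ∀ (fuel : Nat) (V : List (List Bool)) (S comp : List (Int × Int)),
    pvRect V H W → S.Nodup →
    (∀ z ∈ S, pvInG H W z ∧ pvGet2 false V z.2 z.1 = true) →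
    2 * pvCnt (fun b => b = false) V + S.length ≤ fuel →
    ∃ (V' : List (List Bool)) (q : List (Int × Int)),
      pvLoopA mask (H : Int) (W : Int) fuel V S comp = (V', comp ++ q) ∧
      pvRect V' H W ∧ q.Nodup ∧ (∀ z ∈ q, pvInG H W z) ∧
      (∀ z, pvInG H W z → (pvGet2 false V' z.2 z.1 = true ↔
        pvGet2 false V z.2 z.1 = true ∨
        pvReach mask H W (fun u => pvGet2 false V u.2 u.1 = true) S z)) ∧
      (∀ z, z ∈ q ↔ z ∈ S ∨
        (pvReach mask H W (fun u => pvGet2 false V u.2 u.1 = true) S z ∧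
         pvGet2 false V z.2 z.1 = false)) := by
  intro fuel
  induction fuel with
  | zero =>
    intro V S comp hV _ _ hfuel
    have hS0 : S = [] := List.eq_nil_of_length_eq_zero (by omega)
    subst hS0
    refine ⟨V, [], by simp [pvLoopA], hV, by simp, by simp, ?_, ?_⟩
    · intro z _
      constructor
      · exact fun h => .inl h
      · rintro (h | h)
        · exact h
        · exact absurd h pvReach_nil
    · intro z
      constructor
      · intro h; simp at h
      · rintro (h | ⟨h, _⟩)
        · simp at h
        · exact absurd h pvReach_nil
  | succ fuel ih =>
    intro V S comp hV hnd hS hfuel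
    match S, hnd, hS, hfuel with
    | [], hnd, hS, hfuel =>
      refine ⟨V, [], by simp [pvLoopA], hV, by simp, by simp, ?_, ?_⟩
      · intro z _
        constructor
        · exact fun h => .inl h
        · rintro (h | h)
          · exact h
          · exact absurd h pvReach_nil
      · intro z
        constructor
        · intro h; simp at h
        · rintro (h | ⟨h, _⟩)
          · simp at h
          · exact absurd h pvReach_nil
    | c :: rest, hnd, hS, hfuel =>
      obtain ⟨V1, ns, hfold, hrect1, hndns, hmem, hmark, hcnt⟩ :=
        pvFoldA_spec mask H W (pvDirsA.map (fun d => (c.1 + d.1, c.2 + d.2))) V rest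
          (pvNodupImagesA c) hV
      have hcG : pvInG H W c := (hS c (by simp)).1
      have hcP : pvGet2 false V c.2 c.1 = true := (hS c (by simp)).2
      have hrestnd : rest.Nodup := (List.nodup_cons.1 hnd).2
      have hcrest : c ∉ rest := (List.nodup_cons.1 hnd).1
      -- membership of ns in "transfer" form
      have hnews : ∀ n, n ∈ ns ↔ pvAdj c n ∧ pvInG H W n ∧ pvGet2 0 mask n.2 n.1 = 1 ∧
          ¬ pvGet2 false V n.2 n.1 = true := by
        intro n
        rw [hmem n, pvMemImagesA]
        constructor
        · rintro ⟨⟨hadj, _⟩, hg, hf, hu⟩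
          exact ⟨hadj, hg, hf, by simp [hu]⟩
        · rintro ⟨hadj, hg, hf, hu⟩
          refine ⟨⟨hadj, ?_⟩, hg, hf, by simpa using hu⟩
          intro hc; subst hc; exact hu hcP
      have hnsG : ∀ n ∈ ns, pvInG H W n := fun n hn => ((hmem n).1 hn).2.1
      have hnsU : ∀ n ∈ ns, pvGet2 false V n.2 n.1 = false := fun n hn => ((hmem n).1 hn).2.2.2
      -- the new pending list
      have hS'mem : ∀ z, z ∈ ns.reverse ++ rest ↔ z ∈ rest ∨ z ∈ ns := by
        intro z; simp [Or.comm]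
      have hS'nd : (ns.reverse ++ rest).Nodup := by
        rw [List.nodup_append]
        refine ⟨by simpa using hndns, hrestnd, fun z hz b hb he => ?_⟩
        subst he
        have h1 := hnsU z (by simpa using hz)
        have h2 := (hS z (by simp [hb])).2
        simp [h1] at h2
      have hS'marked : ∀ z ∈ ns.reverse ++ rest, pvInG H W z ∧ pvGet2 false V1 z.2 z.1 = true := by
        intro z hz
        rcases (hS'mem z).1 hz with h | h
        · have hzG := (hS z (by simp [h])).1
          exact ⟨hzG, (hmark z hzG).2 (.inl (hS z (by simp [h])).2)⟩
        · exact ⟨hnsG z h, (hmark z (hnsG z h)).2 (.inr h)⟩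
      have hfuel' : 2 * pvCnt (fun b => b = false) V1 + (ns.reverse ++ rest).length ≤ fuel := by
        simp only [List.length_append, List.length_reverse]
        have := List.length_cons (a := c) (as := rest) ▸ hfuel
        omega
      obtain ⟨V', q', hloop, hrect', hndq', hq'G, hmark', hmemq'⟩ :=
        ih V1 (ns.reverse ++ rest) (comp ++ [c]) hrect1 hS'nd hS'marked hfuel'
      -- the transfer equivalence
      have htrans := pvReach_transfer (mask := mask) (H := H) (W := W)
        (P := fun u => pvGet2 false V u.2 u.1 = true)
        (P' := fun u => pvGet2 false V1 u.2 u.1 = true)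
        (c := c) (rest := rest) (S' := ns.reverse ++ rest) (news := ns)
        (fun z hz => (hS z hz).2) (fun z hz => (hS z hz).1) hnews hmark hS'mem
      have hPP1 : ∀ z, pvInG H W z → pvGet2 false V z.2 z.1 = true →
          pvGet2 false V1 z.2 z.1 = true := fun z hz h => (hmark z hz).2 (.inl h)
      have hrun : pvLoopA mask (H : Int) (W : Int) (fuel + 1) V (c :: rest) comp
          = (V', (comp ++ [c]) ++ q') := by
        show pvLoopA mask (H : Int) (W : Int) fuel
          ((pvDirsA.map (fun d => (c.1 + d.1, c.2 + d.2))).foldl (pvPushCA mask _ _) (V, rest)).1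
          ((pvDirsA.map (fun d => (c.1 + d.1, c.2 + d.2))).foldl (pvPushCA mask _ _) (V, rest)).2
          (comp ++ [c]) = _
        rw [hfold]
        exact hloop
      refine ⟨V', c :: q', ?_, hrect', ?_, ?_, ?_, ?_⟩
      · rw [hrun]; simp
      · refine List.nodup_cons.2 ⟨?_, hndq'⟩
        intro hc
        rcases (hmemq' c).1 hc with h | ⟨hR, hu⟩
        · rcases (hS'mem c).1 h with h | h
          · exact hcrest h
          · exact absurd hcP (by simp [hnsU c h])
        · exact absurd (hPP1 c hcG hcP) (by simp [hu])
      · intro z hz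
        rcases List.mem_cons.1 hz with h | h
        · subst h; exact hcG
        · exact hq'G z h
      · intro z hz
        rw [hmark' z hz]
        have h1 : pvGet2 false V1 z.2 z.1 = true ∨
            pvReach mask H W (fun u => pvGet2 false V1 u.2 u.1 = true) (ns.reverse ++ rest) z ↔
            pvGet2 false V z.2 z.1 = true ∨
            pvReach mask H W (fun u => pvGet2 false V u.2 u.1 = true) (c :: rest) z :=
          (htrans z hz).symm
        constructor
        · rintro (h | h)
          · exact h1.1 (.inl h)
          · exact h1.1 (.inr h)
        · intro h
          exact h1.2 h
      · intro z
        simp only [List.mem_cons]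
        constructor
        · rintro (hzc | hzq)
          · exact .inl (.inl hzc)
          · rcases (hmemq' z).1 hzq with h | ⟨hR1, hu1⟩
            · rcases (hS'mem z).1 h with h | h
              · exact .inl (.inr h)
              · refine .inr ⟨?_, hnsU z h⟩
                obtain ⟨hadj, hg, hf, hu⟩ := (hnews z).1 h
                exact .step (.base (by simp)) hadj hg hf hu
            · have hzG : pvInG H W z := by
                rcases pvReach_mem_or_inG hR1 with h | h
                · exact (hS'marked z h).1
                · exact h
              have hnP1 : ¬ pvGet2 false V1 z.2 z.1 = true := by simp [hu1]
              rcases (htrans z hzG).2 (.inr hR1) with h | h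
              · exact absurd (hPP1 z hzG h) hnP1
              · refine .inr ⟨h, ?_⟩
                by_contra hc
                exact hnP1 (hPP1 z hzG (by simpa using hc))
        · rintro ((hzc | hzrest) | ⟨hR0, hu0⟩)
          · exact .inl hzc
          · exact .inr ((hmemq' z).2 (.inl ((hS'mem z).2 (.inl hzrest))))
          · have hzG : pvInG H W z := by
              rcases pvReach_mem_or_inG hR0 with h | h
              · exact (hS z h).1
              · exact h
            have htr := (htrans z hzG).1 (.inr hR0)
            by_cases hP1 : pvGet2 false V1 z.2 z.1 = true
            · have hzns : z ∈ ns := by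
                rcases (hmark z hzG).1 hP1 with h | h
                · rw [h] at hu0; cases hu0
                · exact h
              exact .inr ((hmemq' z).2 (.inl ((hS'mem z).2 (.inr hzns))))
            · rcases htr with h | h
              · exact absurd h hP1
              · exact .inr ((hmemq' z).2 (.inr ⟨h, by simpa using hP1⟩))
theorem pvLoopB_spec (mask : List (List Int)) (H W : Nat) (lid : Int) (hlid : lid ≠ -1) :
    ∀ (fuel : Nat) (L : List (List Int)) (S : List (Int × Int)) (cnt : Nat),
    pvRect L H W → S.Nodup →
    (∀ z ∈ S, pvInG H W z ∧ pvGet2 (-1) L z.2 z.1 = lid) →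
    2 * pvCnt (fun v => v = -1) L + S.length ≤ fuel →
    ∃ (L' : List (List Int)) (q : List (Int × Int)),
      pvLoopB mask (H : Int) (W : Int) lid fuel L S cnt = (L', cnt + q.length) ∧
      pvRect L' H W ∧ q.Nodup ∧ (∀ z ∈ q, pvInG H W z) ∧
      (∀ z, pvInG H W z →
        pvGet2 (-1) L' z.2 z.1 = (if z ∈ q then lid else pvGet2 (-1) L z.2 z.1)) ∧
      (∀ z, z ∈ q ↔ z ∈ S ∨
        (pvReach mask H W (fun u => ¬ pvGet2 (-1) L u.2 u.1 = -1) S z ∧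
         pvGet2 (-1) L z.2 z.1 = -1)) := by
  intro fuel
  induction fuel with
  | zero =>
    intro L S cnt hL _ _ hfuel
    have hS0 : S = [] := List.eq_nil_of_length_eq_zero (by omega)
    subst hS0
    refine ⟨L, [], by simp [pvLoopB], hL, by simp, by simp, by simp, ?_⟩
    intro z
    constructor
    · intro h; simp at h
    · rintro (h | ⟨h, _⟩)
      · simp at h
      · exact absurd h pvReach_nil
  | succ fuel ih =>
    intro L S cnt hL hnd hS hfuel
    match S, hnd, hS, hfuel with
    | [], hnd, hS, hfuel =>
      refine ⟨L, [], by simp [pvLoopB], hL, by simp, by simp, by simp, ?_⟩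
      intro z
      constructor
      · intro h; simp at h
      · rintro (h | ⟨h, _⟩)
        · simp at h
        · exact absurd h pvReach_nil
    | c :: rest, hnd, hS, hfuel =>
      obtain ⟨L1, ns, hfold, hrect1, hndns, hmem, hval, hcnt⟩ :=
        pvFoldB_spec mask H W lid hlid
          ([c.2 - 1, c.2, c.2 + 1].flatMap (fun ny =>
            [c.1 - 1, c.1, c.1 + 1].map (fun nx => (nx, ny)))) L rest
          (pvNodupImagesB c) hL
      have hcG : pvInG H W c := (hS c (by simp)).1
      have hcL : pvGet2 (-1) L c.2 c.1 = lid := (hS c (by simp)).2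
      have hcP : ¬ pvGet2 (-1) L c.2 c.1 = -1 := by rw [hcL]; exact hlid
      have hrestnd : rest.Nodup := (List.nodup_cons.1 hnd).2
      have hcrest : c ∉ rest := (List.nodup_cons.1 hnd).1
      have hnews : ∀ n, n ∈ ns ↔ pvAdj c n ∧ pvInG H W n ∧ pvGet2 0 mask n.2 n.1 = 1 ∧
          ¬ ¬ pvGet2 (-1) L n.2 n.1 = -1 := by
        intro n
        rw [hmem n, pvMemImagesB]
        constructor
        · rintro ⟨hadj, hg, hf, hu⟩
          exact ⟨hadj, hg, hf, by simp [hu]⟩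
        · rintro ⟨hadj, hg, hf, hu⟩
          exact ⟨hadj, hg, hf, by simpa using hu⟩
      have hnsG : ∀ n ∈ ns, pvInG H W n := fun n hn => ((hmem n).1 hn).2.1
      have hnsU : ∀ n ∈ ns, pvGet2 (-1) L n.2 n.1 = -1 := fun n hn => ((hmem n).1 hn).2.2.2
      have hmark : ∀ z, pvInG H W z →
          (¬ pvGet2 (-1) L1 z.2 z.1 = -1 ↔ ¬ pvGet2 (-1) L z.2 z.1 = -1 ∨ z ∈ ns) := by
        intro z hz
        rw [hval z hz]
        by_cases hzn : z ∈ ns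
        · simp [hzn, hlid]
        · simp [hzn]
      have hS'mem : ∀ z, z ∈ rest ++ ns ↔ z ∈ rest ∨ z ∈ ns := by
        intro z; simp
      have hS'nd : (rest ++ ns).Nodup := by
        rw [List.nodup_append]
        refine ⟨hrestnd, hndns, fun z hz b hb he => ?_⟩
        subst he
        have h1 := hnsU z hb
        have h2 := (hS z (by simp [hz])).2
        rw [h1] at h2; exact hlid h2.symm
      have hS'marked : ∀ z ∈ rest ++ ns, pvInG H W z ∧ pvGet2 (-1) L1 z.2 z.1 = lid := by
        intro z hz
        rcases (hS'mem z).1 hz with h | h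
        · have hzG := (hS z (by simp [h])).1
          refine ⟨hzG, ?_⟩
          rw [hval z hzG]
          by_cases hzn : z ∈ ns
          · simp [hzn]
          · simp [hzn]; exact (hS z (by simp [h])).2
        · exact ⟨hnsG z h, by rw [hval z (hnsG z h)]; simp [h]⟩
      have hfuel' : 2 * pvCnt (fun v => v = -1) L1 + (rest ++ ns).length ≤ fuel := by
        simp only [List.length_append]
        have := List.length_cons (a := c) (as := rest) ▸ hfuel
        omega
      obtain ⟨L', q', hloop, hrect', hndq', hq'G, hval', hmemq'⟩ :=
        ih L1 (rest ++ ns) (cnt + 1) hrect1 hS'nd hS'marked hfuel'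
      have htrans := pvReach_transfer (mask := mask) (H := H) (W := W)
        (P := fun u => ¬ pvGet2 (-1) L u.2 u.1 = -1)
        (P' := fun u => ¬ pvGet2 (-1) L1 u.2 u.1 = -1)
        (c := c) (rest := rest) (S' := rest ++ ns) (news := ns)
        (fun z hz => by
          show ¬ pvGet2 (-1) L z.2 z.1 = -1
          rw [(hS z hz).2]; exact hlid)
        (fun z hz => (hS z hz).1) hnews hmark hS'mem
      have hPP1 : ∀ z, pvInG H W z → ¬ pvGet2 (-1) L z.2 z.1 = -1 →
          ¬ pvGet2 (-1) L1 z.2 z.1 = -1 := fun z hz h => (hmark z hz).2 (.inl h)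
      have hrun : pvLoopB mask (H : Int) (W : Int) lid (fuel + 1) L (c :: rest) cnt
          = (L', (cnt + 1) + q'.length) := by
        show pvLoopB mask (H : Int) (W : Int) lid fuel
          (([c.2 - 1, c.2, c.2 + 1].flatMap (fun ny =>
            [c.1 - 1, c.1, c.1 + 1].map (fun nx => (nx, ny)))).foldl
              (pvPushCB mask _ _ lid) (L, rest)).1
          (([c.2 - 1, c.2, c.2 + 1].flatMap (fun ny =>
            [c.1 - 1, c.1, c.1 + 1].map (fun nx => (nx, ny)))).foldl
              (pvPushCB mask _ _ lid) (L, rest)).2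
          (cnt + 1) = _
        rw [hfold]
        exact hloop
      have hcq' : c ∉ q' := by
        intro hc
        rcases (hmemq' c).1 hc with h | ⟨hR, hu⟩
        · rcases (hS'mem c).1 h with h | h
          · exact hcrest h
          · exact hcP (hnsU c h)
        · exact (hPP1 c hcG hcP) hu
      refine ⟨L', c :: q', ?_, hrect', ?_, ?_, ?_, ?_⟩
      · rw [hrun]; simp; omega
      · exact List.nodup_cons.2 ⟨hcq', hndq'⟩
      · intro z hz
        rcases List.mem_cons.1 hz with h | h
        · subst h; exact hcG
        · exact hq'G z h
      · intro z hz
        rw [hval' z hz]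
        by_cases hzq : z ∈ q'
        · rw [if_pos hzq, if_pos (by simp [hzq])]
        · have hz1 : pvGet2 (-1) L1 z.2 z.1 = (if z ∈ ns then lid else pvGet2 (-1) L z.2 z.1) :=
            hval z hz
          by_cases hzc : z = c
          · rw [if_neg hzq, if_pos (by simp [hzc]), hz1]
            by_cases hzn : z ∈ ns
            · rw [if_pos hzn]
            · rw [if_neg hzn, hzc]; exact hcL
          · have hzns : z ∉ ns := by
              intro hc
              exact hzq ((hmemq' z).2 (.inl ((hS'mem z).2 (.inr hc))))
            rw [if_neg hzq, hz1, if_neg hzns, if_neg (by simp [hzc, hzq])]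
      · intro z
        simp only [List.mem_cons]
        constructor
        · rintro (hzc | hzq)
          · exact .inl (by simp [hzc])
          · rcases (hmemq' z).1 hzq with h | ⟨hR1, hu1⟩
            · rcases (hS'mem z).1 h with h | h
              · exact .inl (by simp [h])
              · refine .inr ⟨?_, hnsU z h⟩
                obtain ⟨hadj, hg, hf, hu⟩ := (hnews z).1 h
                exact .step (.base (by simp)) hadj hg hf hu
            · have hzG : pvInG H W z := by
                rcases pvReach_mem_or_inG hR1 with h | h
                · exact (hS'marked z h).1
                · exact h
              have hnP1 : ¬ ¬ pvGet2 (-1) L1 z.2 z.1 = -1 := by simp [hu1]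
              rcases (htrans z hzG).2 (.inr hR1) with h | h
              · exact absurd (hPP1 z hzG h) hnP1
              · refine .inr ⟨h, ?_⟩
                by_contra hc
                exact hnP1 (hPP1 z hzG hc)
        · rintro ((hzc | hzrest) | ⟨hR0, hu0⟩)
          · exact .inl hzc
          · exact .inr ((hmemq' z).2 (.inl ((hS'mem z).2 (.inl hzrest))))
          · have hzG : pvInG H W z := by
              rcases pvReach_mem_or_inG hR0 with h | h
              · exact (hS z h).1
              · exact h
            have htr := (htrans z hzG).1 (.inr hR0)
            by_cases hP1 : ¬ pvGet2 (-1) L1 z.2 z.1 = -1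
            · have hzns : z ∈ ns := by
                rcases (hmark z hzG).1 hP1 with h | h
                · exact absurd hu0 h
                · exact h
              exact .inr ((hmemq' z).2 (.inl ((hS'mem z).2 (.inr hzns))))
            · rcases htr with h | h
              · exact absurd h hP1
              · exact .inr ((hmemq' z).2 (.inr ⟨h, by simpa using hP1⟩))
theorem pvGetD_snoc (l : List Int) (v d : Int) : (l ++ [v]).getD l.length d = v := by
  rw [List.getD_eq_getElem _ _ (by simp)]
  simp

theorem pvWrite_spec (H W : Nat) :
    ∀ (q : List (Int × Int)) (o : List (List Int)),
    pvRect o H W → (∀ z ∈ q, pvInG H W z) →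
    pvRect (q.foldl (fun o c => pvSet2 o c.2 c.1 1) o) H W ∧
    (∀ z, pvInG H W z → pvGet2 0 (q.foldl (fun o c => pvSet2 o c.2 c.1 1) o) z.2 z.1
      = (if z ∈ q then 1 else pvGet2 0 o z.2 z.1)) := by
  intro q
  induction q with
  | nil => intro o ho _; exact ⟨ho, by simp⟩
  | cons a t ih =>
    intro o ho hq
    have haG : pvInG H W a := hq a (by simp)
    have ho1 : pvRect (pvSet2 o a.2 a.1 1) H W := pvRect_set2 ho _ _ _
    obtain ⟨hr, hv⟩ := ih (pvSet2 o a.2 a.1 1) ho1 (fun z hz => hq z (by simp [hz]))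
    refine ⟨by simpa using hr, ?_⟩
    intro z hz
    rw [List.foldl_cons, hv z hz]
    by_cases hzt : z ∈ t
    · rw [if_pos hzt, if_pos (by simp [hzt])]
    · rw [if_neg hzt]
      by_cases hza : z = a
      · rw [if_pos (by simp [hza]), hza]
        exact pvGet2_set2_self 0 ho haG.2.2.1 haG.2.2.2 haG.1 haG.2.1 1
      · rw [if_neg (by simp [hza, hzt])]
        exact pvGet2_set2_ne 0 ho haG.2.2.1 haG.2.2.2 haG.1 haG.2.1 hz.2.2.1 hz.1
          (fun hcon => hza (Prod.ext hcon.2 hcon.1)) 1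

def pvInv (mask : List (List Int)) (min_area : Int) (H W : Nat)
    (out : List (List Int)) (V : List (List Bool))
    (label : List (List Int)) (sizes : List Int) : Prop :=
  pvRect out H W ∧ pvRect V H W ∧ pvRect label H W ∧
  (∀ z, pvInG H W z → (pvGet2 false V z.2 z.1 = true ↔ ¬ pvGet2 (-1) label z.2 z.1 = -1)) ∧
  (∀ z, pvInG H W z → (pvGet2 (-1) label z.2 z.1 = -1 ∨
    (0 ≤ pvGet2 (-1) label z.2 z.1 ∧ (pvGet2 (-1) label z.2 z.1).toNat < sizes.length))) ∧
  (∀ z, pvInG H W z → pvGet2 0 out z.2 z.1 =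
    (if 0 ≤ pvGet2 (-1) label z.2 z.1 ∧
        min_area ≤ sizes.getD (pvGet2 (-1) label z.2 z.1).toNat 0
     then 1 else 0))

def pvStepA (mask : List (List Int)) (min_area h w : Int)
    (st : List (List Int) × List (List Bool)) (c : Int × Int) :
    List (List Int) × List (List Bool) :=
  if pvGet2 0 mask c.2 c.1 = 1 ∧ pvGet2 false st.2 c.2 c.1 = false then
    let V1 := pvSet2 st.2 c.2 c.1 true
    let r := pvLoopA mask h w (2 * mask.length * w.toNat + 1) V1 [(c.1, c.2)] []
    let out' := if min_area ≤ (r.2.length : Int)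
      then r.2.foldl (fun o c => pvSet2 o c.2 c.1 1) st.1
      else st.1
    (out', r.1)
  else st

def pvStepB (mask : List (List Int)) (h w : Int)
    (st : List (List Int) × List Int) (c : Int × Int) :
    List (List Int) × List Int :=
  if pvGet2 0 mask c.2 c.1 = 1 ∧ pvGet2 (-1) st.1 c.2 c.1 = -1 then
    let lid : Int := st.2.length
    let L1 := pvSet2 st.1 c.2 c.1 lid
    let r := pvLoopB mask mask.length w lid (2 * mask.length * w.toNat + 1) L1 [(c.1, c.2)] 0
    (r.1, st.2 ++ [(r.2 : Int)])
  else st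

theorem pvStep_inv (mask : List (List Int)) (min_area : Int) (H W : Nat)
    (hH : mask.length = H) (c : Int × Int) (hc : pvInG H W c)
    (out : List (List Int)) (V : List (List Bool)) (label : List (List Int)) (sizes : List Int)
    (hinv : pvInv mask min_area H W out V label sizes) :
    pvInv mask min_area H W
      (pvStepA mask min_area (H : Int) (W : Int) (out, V) c).1
      (pvStepA mask min_area (H : Int) (W : Int) (out, V) c).2
      (pvStepB mask (H : Int) (W : Int) (label, sizes) c).1
      (pvStepB mask (H : Int) (W : Int) (label, sizes) c).2 := by
  obtain ⟨hOr, hVr, hLr, hE, hL, hO⟩ := hinv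
  have hEf : ∀ z, pvInG H W z →
      (pvGet2 false V z.2 z.1 = false ↔ pvGet2 (-1) label z.2 z.1 = -1) := by
    intro z hz
    have := hE z hz
    constructor
    · intro h
      by_contra hcon
      have := this.2 hcon
      rw [h] at this; cases this
    · intro h
      cases hb : pvGet2 false V z.2 z.1
      · rfl
      · exact absurd h (by simpa using this.1 hb)
  by_cases hcond : pvGet2 0 mask c.2 c.1 = 1 ∧ pvGet2 false V c.2 c.1 = false
  · -- seed: both programs flood-fill the same new component
    have hcondB : pvGet2 0 mask c.2 c.1 = 1 ∧ pvGet2 (-1) label c.2 c.1 = -1 :=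
      ⟨hcond.1, (hEf c hc).1 hcond.2⟩
    have hx0 : 0 ≤ c.1 := hc.1
    have hx1 : c.1 < (W : Int) := hc.2.1
    have hy0 : 0 ≤ c.2 := hc.2.2.1
    have hy1 : c.2 < (H : Int) := hc.2.2.2
    set lid : Int := (sizes.length : Int) with hliddef
    have hlid : lid ≠ -1 := by rw [hliddef]; omega
    set V1 := pvSet2 V c.2 c.1 true with hV1def
    set L1 := pvSet2 label c.2 c.1 lid with hL1def
    have hV1r : pvRect V1 H W := pvRect_set2 hVr _ _ _
    have hL1r : pvRect L1 H W := pvRect_set2 hLr _ _ _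
    have hgV1c : pvGet2 false V1 c.2 c.1 = true := pvGet2_set2_self false hVr hy0 hy1 hx0 hx1 true
    have hgL1c : pvGet2 (-1) L1 c.2 c.1 = lid := pvGet2_set2_self (-1) hLr hy0 hy1 hx0 hx1 lid
    have hgV1ne : ∀ z, pvInG H W z → z ≠ c →
        pvGet2 false V1 z.2 z.1 = pvGet2 false V z.2 z.1 := by
      intro z hz hzc
      exact pvGet2_set2_ne false hVr hy0 hy1 hx0 hx1 hz.2.2.1 hz.1
        (fun hcon => hzc (Prod.ext hcon.2 hcon.1)) true
    have hgL1ne : ∀ z, pvInG H W z → z ≠ c →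
        pvGet2 (-1) L1 z.2 z.1 = pvGet2 (-1) label z.2 z.1 := by
      intro z hz hzc
      exact pvGet2_set2_ne (-1) hLr hy0 hy1 hx0 hx1 hz.2.2.1 hz.1
        (fun hcon => hzc (Prod.ext hcon.2 hcon.1)) lid
    -- the two flood fills
    have hfuelA : 2 * pvCnt (fun b => b = false) V1 + ([(c.1, c.2)] : List (Int × Int)).length
        ≤ 2 * H * ((W : Int)).toNat + 1 := by
      have h1 := pvCnt_le (fun b => b = false) hV1r
      have h2 : 2 * H * W = 2 * (H * W) := by ring
      simp only [List.length_cons, List.length_nil, Int.toNat_natCast, h2]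
      omega
    obtain ⟨V', qA, hrunA, hV'r, hndA, hqAG, hmarkA, hmemA⟩ :=
      pvLoopA_spec mask H W (2 * H * ((W : Int)).toNat + 1) V1 [(c.1, c.2)] []
        hV1r (by simp) (by
          intro z hz
          simp at hz
          subst hz
          exact ⟨hc, hgV1c⟩) hfuelA
    have hfuelB : 2 * pvCnt (fun v => v = -1) L1 + ([(c.1, c.2)] : List (Int × Int)).length
        ≤ 2 * H * ((W : Int)).toNat + 1 := by
      have h1 := pvCnt_le (fun v => v = -1) hL1r
      have h2 : 2 * H * W = 2 * (H * W) := by ring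
      simp only [List.length_cons, List.length_nil, Int.toNat_natCast, h2]
      omega
    obtain ⟨L', qB, hrunB, hL'r, hndB, hqBG, hvalB, hmemB⟩ :=
      pvLoopB_spec mask H W lid hlid (2 * H * ((W : Int)).toNat + 1) L1 [(c.1, c.2)] 0
        hL1r (by simp) (by
          intro z hz
          simp at hz
          subst hz
          exact ⟨hc, hgL1c⟩) hfuelB
    -- the two marked predicates after seeding agree
    have hP1iff : ∀ z, pvInG H W z →
        (pvGet2 false V1 z.2 z.1 = true ↔ ¬ pvGet2 (-1) L1 z.2 z.1 = -1) := by
      intro z hz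
      by_cases hzc : z = c
      · subst hzc
        rw [hgV1c, hgL1c]
        simp [hlid]
      · rw [hgV1ne z hz hzc, hgL1ne z hz hzc]
        exact hE z hz
    have hReach : ∀ z,
        pvReach mask H W (fun u => pvGet2 false V1 u.2 u.1 = true) [(c.1, c.2)] z ↔
        pvReach mask H W (fun u => ¬ pvGet2 (-1) L1 u.2 u.1 = -1) [(c.1, c.2)] z := by
      intro z
      constructor
      · exact pvReach_congr (fun u hu => hP1iff u hu) (fun u hu => hu)
      · exact pvReach_congr (fun u hu => (hP1iff u hu).symm) (fun u hu => hu)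
    have hqiff : ∀ z, z ∈ qA ↔ z ∈ qB := by
      intro z
      rw [hmemA z, hmemB z]
      by_cases hzS : z ∈ ([(c.1, c.2)] : List (Int × Int))
      · simp [hzS]
      · simp only [hzS, false_or]
        constructor
        · rintro ⟨hR, hu⟩
          have hzG : pvInG H W z := by
            rcases pvReach_mem_or_inG hR with h | h
            · exact absurd h hzS
            · exact h
          refine ⟨(hReach z).1 hR, ?_⟩
          by_contra hcon
          have := (hP1iff z hzG).2 (by simpa using hcon)
          rw [hu] at this; cases this
        · rintro ⟨hR, hu⟩
          have hzG : pvInG H W z := by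
            rcases pvReach_mem_or_inG hR with h | h
            · exact absurd h hzS
            · exact h
          refine ⟨(hReach z).2 hR, ?_⟩
          cases hb : pvGet2 false V1 z.2 z.1
          · rfl
          · have := (hP1iff z hzG).1 hb
            exact absurd hu (by simpa using this)
    have hlen : qA.length = qB.length :=
      List.Perm.length_eq ((List.perm_ext_iff_of_nodup hndA hndB).2 hqiff)
    -- unfold the two steps
    have hstepA : pvStepA mask min_area (H : Int) (W : Int) (out, V) c
        = (if min_area ≤ (qA.length : Int)
            then qA.foldl (fun o c => pvSet2 o c.2 c.1 1) out else out, V') := by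
      unfold pvStepA
      rw [if_pos hcond]
      simp only [hH, ← hV1def]
      rw [hrunA]
      simp
    have hstepB : pvStepB mask (H : Int) (W : Int) (label, sizes) c
        = (L', sizes ++ [(qB.length : Int)]) := by
      unfold pvStepB
      rw [if_pos hcondB]
      simp only [hH, ← hliddef, ← hL1def]
      rw [hrunB]
      simp
    rw [hstepA, hstepB]
    -- component cells had label -1 before (w.r.t. label, not L1)
    have hqB_old : ∀ z ∈ qB, pvInG H W z ∧ pvGet2 (-1) label z.2 z.1 = -1 := by
      intro z hz
      refine ⟨hqBG z hz, ?_⟩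
      rcases (hmemB z).1 hz with h | ⟨hR, hu⟩
      · have hzc2 : z = c := by simpa using h
        rw [hzc2]; exact hcondB.2
      · by_cases hzc : z = c
        · rw [hzc]; exact hcondB.2
        · rw [← hgL1ne z (hqBG z hz) hzc]; exact hu
    -- the new label values
    have hlab' : ∀ z, pvInG H W z → pvGet2 (-1) L' z.2 z.1
        = (if z ∈ qB then lid else pvGet2 (-1) label z.2 z.1) := by
      intro z hz
      rw [hvalB z hz]
      by_cases hzq : z ∈ qB
      · simp [hzq]
      · rw [if_neg hzq, if_neg hzq]
        have hzc : z ≠ c := by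
          intro h
          exact hzq ((hmemB z).2 (.inl (by simp [h])))
        exact hgL1ne z hz hzc
    refine ⟨?_, hV'r, hL'r, ?_, ?_, ?_⟩
    · by_cases hbig : min_area ≤ (qA.length : Int)
      · rw [if_pos hbig]
        exact (pvWrite_spec H W qA out hOr hqAG).1
      · rw [if_neg hbig]
        exact hOr
    · -- E invariant
      intro z hz
      rw [hmarkA z hz, hlab' z hz]
      by_cases hzq : z ∈ qB
      · rw [if_pos hzq]
        constructor
        · intro _; exact hlid
        · intro _
          rcases (hmemB z).1 hzq with h | ⟨hR, hu⟩
          · left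
            have hzc2 : z = c := by simpa using h
            rw [hzc2]; exact hgV1c
          · right; exact (hReach z).2 hR
      · rw [if_neg hzq]
        constructor
        · rintro (h | h)
          · by_cases hzc : z = c
            · exact absurd ((hmemB z).2 (.inl (by simp [hzc]))) hzq
            · rw [hgV1ne z hz hzc] at h
              exact (hE z hz).1 h
          · exfalso
            apply hzq
            apply (hmemB z).2
            right
            refine ⟨(hReach z).1 h, ?_⟩
            by_contra hcon
            have hmm := (hP1iff z hz).2 (by simpa using hcon)
            -- z marked in V1 and reachable: then z = c or ¬P1 z — use pvReach_mem_or_not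
            rcases pvReach_mem_or_not h with hm | hm
            · have hzc2 : z = c := by simpa using hm
              exact hzq ((hmemB z).2 (.inl (by simp [hzc2])))
            · exact hm hmm
        · intro h
          left
          by_cases hzc : z = c
          · rw [hzc]; exact hgV1c
          · rw [hgV1ne z hz hzc]
            exact (hE z hz).2 h
    · -- L invariant
      intro z hz
      rw [hlab' z hz]
      by_cases hzq : z ∈ qB
      · rw [if_pos hzq]
        right
        refine ⟨by rw [hliddef]; omega, ?_⟩
        rw [hliddef]
        simp
      · rw [if_neg hzq]
        rcases hL z hz with h | ⟨h1, h2⟩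
        · exact .inl h
        · exact .inr ⟨h1, by simp; omega⟩
    · -- O invariant
      intro z hz
      rw [hlab' z hz]
      by_cases hzq : z ∈ qB
      · have hzqA : z ∈ qA := (hqiff z).2 hzq
        rw [if_pos hzq]
        have hsz : (sizes ++ [(qB.length : Int)]).getD lid.toNat 0 = (qB.length : Int) := by
          simp only [hliddef, Int.toNat_natCast]
          exact pvGetD_snoc sizes _ 0
        rw [hsz]
        by_cases hbig : min_area ≤ (qA.length : Int)
        · rw [if_pos hbig]
          rw [(pvWrite_spec H W qA out hOr hqAG).2 z hz, if_pos hzqA]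
          rw [if_pos ⟨by simp [hliddef], by rw [← hlen]; exact hbig⟩]
        · rw [if_neg hbig]
          rw [hO z hz, (hqB_old z hzq).2]
          rw [if_neg (by simp), if_neg (by
            rintro ⟨_, hcon⟩
            rw [← hlen] at hcon
            exact hbig hcon)]
      · rw [if_neg hzq]
        have hval : pvGet2 0 (if min_area ≤ (qA.length : Int)
            then qA.foldl (fun o c => pvSet2 o c.2 c.1 1) out else out) z.2 z.1
            = pvGet2 0 out z.2 z.1 := by
          by_cases hbig : min_area ≤ (qA.length : Int)
          · rw [if_pos hbig, (pvWrite_spec H W qA out hOr hqAG).2 z hz,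
              if_neg (fun hcon => hzq ((hqiff z).1 hcon))]
          · rw [if_neg hbig]
        rw [hval, hO z hz]
        rcases hL z hz with h | ⟨h1, h2⟩
        · rw [h]
          rw [if_neg (by simp), if_neg (by simp)]
        · have hgd : (sizes ++ [(qB.length : Int)]).getD (pvGet2 (-1) label z.2 z.1).toNat 0
              = sizes.getD (pvGet2 (-1) label z.2 z.1).toNat 0 := by
            rw [List.getD_append _ _ _ _ h2]
          rw [hgd]
  · -- no seed: neither program fires
    have hcondB : ¬ (pvGet2 0 mask c.2 c.1 = 1 ∧ pvGet2 (-1) label c.2 c.1 = -1) := by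
      rintro ⟨h1, h2⟩
      exact hcond ⟨h1, (hEf c hc).2 h2⟩
    have hsA : pvStepA mask min_area (H : Int) (W : Int) (out, V) c = (out, V) := by
      unfold pvStepA; rw [if_neg (by exact hcond)]
    have hsB : pvStepB mask (H : Int) (W : Int) (label, sizes) c = (label, sizes) := by
      unfold pvStepB; rw [if_neg (by exact hcondB)]
    rw [hsA, hsB]
    exact ⟨hOr, hVr, hLr, hE, hL, hO⟩
theorem pvScan_inv (mask : List (List Int)) (min_area : Int) (H W : Nat)
    (hH : mask.length = H) :
    ∀ (cells : List (Int × Int)) (out : List (List Int)) (V : List (List Bool))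
      (label : List (List Int)) (sizes : List Int),
    (∀ c ∈ cells, pvInG H W c) →
    pvInv mask min_area H W out V label sizes →
    pvInv mask min_area H W
      (cells.foldl (pvStepA mask min_area (H : Int) (W : Int)) (out, V)).1
      (cells.foldl (pvStepA mask min_area (H : Int) (W : Int)) (out, V)).2
      (cells.foldl (pvStepB mask (H : Int) (W : Int)) (label, sizes)).1
      (cells.foldl (pvStepB mask (H : Int) (W : Int)) (label, sizes)).2 := by
  intro cells
  induction cells with
  | nil => intro out V label sizes _ hinv; simpa using hinv
  | cons a t ih =>
    intro out V label sizes hcell hinv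
    simp only [List.foldl_cons]
    have hstep := pvStep_inv mask min_area H W hH a (hcell a (by simp)) out V label sizes hinv
    have hrec := ih (pvStepA mask min_area (H : Int) (W : Int) (out, V) a).1
      (pvStepA mask min_area (H : Int) (W : Int) (out, V) a).2
      (pvStepB mask (H : Int) (W : Int) (label, sizes) a).1
      (pvStepB mask (H : Int) (W : Int) (label, sizes) a).2
      (fun c hc => hcell c (by simp [hc])) hstep
    simpa using hrec

theorem pvBridgeA (mask : List (List Int)) (min_area h w : Int)
    (init : List (List Int) × List (List Bool)) :
    (PySem.List.pyRange 0 h 1).foldl (fun st y =>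
      (PySem.List.pyRange 0 w 1).foldl (fun (st : List (List Int) × List (List Bool)) x =>
        if pvGet2 0 mask y x = 1 ∧ pvGet2 false st.2 y x = false then
          let V1 := pvSet2 st.2 y x true
          let r := pvLoopA mask h w (2 * mask.length * w.toNat + 1) V1 [(x, y)] []
          let out' := if min_area ≤ (r.2.length : Int)
            then r.2.foldl (fun o c => pvSet2 o c.2 c.1 1) st.1
            else st.1
          (out', r.1)
        else st) st) init
    = ((PySem.List.pyRange 0 h 1).flatMap (fun y =>
        (PySem.List.pyRange 0 w 1).map (fun x => (x, y)))).foldl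
        (pvStepA mask min_area h w) init := by
  rw [List.foldl_flatMap]
  simp only [List.foldl_map]
  rfl

theorem pvBridgeB (mask : List (List Int)) (h w : Int)
    (init : List (List Int) × List Int) :
    (PySem.List.pyRange 0 h 1).foldl (fun st y =>
      (PySem.List.pyRange 0 w 1).foldl (fun (st : List (List Int) × List Int) x =>
        if pvGet2 0 mask y x = 1 ∧ pvGet2 (-1) st.1 y x = -1 then
          let lid : Int := st.2.length
          let L1 := pvSet2 st.1 y x lid
          let r := pvLoopB mask mask.length w lid (2 * mask.length * w.toNat + 1) L1 [(x, y)] 0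
          (r.1, st.2 ++ [(r.2 : Int)])
        else st) st) init
    = ((PySem.List.pyRange 0 h 1).flatMap (fun y =>
        (PySem.List.pyRange 0 w 1).map (fun x => (x, y)))).foldl
        (pvStepB mask h w) init := by
  rw [List.foldl_flatMap]
  simp only [List.foldl_map]
  rfl

theorem pvCellsInG (H W : Nat) :
    ∀ c ∈ (PySem.List.pyRange 0 (H : Int) 1).flatMap
      (fun y => (PySem.List.pyRange 0 (W : Int) 1).map (fun x => (x, y))), pvInG H W c := by
  intro c hc
  simp only [List.mem_flatMap, List.mem_map] at hc
  obtain ⟨y, hy, x, hx, rfl⟩ := hc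
  rw [PySem.List.mem_pyRange_one] at hy hx
  exact ⟨hx.1, hx.2, hy.1, hy.2⟩

theorem pvInv_init (mask : List (List Int)) (min_area : Int) (H W : Nat) :
    pvInv mask min_area H W (List.replicate H (List.replicate W 0))
      (List.replicate H (List.replicate W false))
      (List.replicate H (List.replicate W (-1))) [] := by
  refine ⟨pvRect_replicate H W 0, pvRect_replicate H W false, pvRect_replicate H W (-1),
    ?_, ?_, ?_⟩
  · intro z hz
    rw [pvGet2_replicate false hz.2.2.1 hz.2.2.2 hz.1 hz.2.1,
      pvGet2_replicate (-1) hz.2.2.1 hz.2.2.2 hz.1 hz.2.1]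
    simp
  · intro z hz
    rw [pvGet2_replicate (-1) hz.2.2.1 hz.2.2.2 hz.1 hz.2.1]
    exact .inl rfl
  · intro z hz
    rw [pvGet2_replicate 0 hz.2.2.1 hz.2.2.2 hz.1 hz.2.1,
      pvGet2_replicate (-1) hz.2.2.1 hz.2.2.2 hz.1 hz.2.1]
    rw [if_neg (by simp)]

theorem pvGet2_elem {α : Type} (d : α) {m : List (List α)} {H W : Nat}
    (hm : pvRect m H W) {i j : Nat} (hi : i < H) (hj : j < W)
    (hi' : i < m.length) (hj' : j < (m[i]'hi').length) :
    pvGet2 d m (i : Int) (j : Int) = (m[i]'hi')[j]'hj' := by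
  unfold pvGet2
  simp only [Int.toNat_natCast]
  rw [List.getD_eq_getElem _ _ hi', List.getD_eq_getElem _ _ hj']
-- ===== VERDICT (by name: the statement is the Claim_ definition above) =====
theorem connected_component_filter_spec : Claim_equal_connected_component_filter := by
  unfold Claim_equal_connected_component_filter
  intro mask min_area _hdom _hpre
  unfold Spec_connected_component_filter
  simp only [connected_component_filter, connected_component_filter_alt]
  rw [pvBridgeA mask min_area, pvBridgeB mask]
  have hw0 : (0 : Int) ≤ (if mask.length ≠ 0 then ((mask.headD []).length : Int) else 0) := by
    split <;> simp
  have hwW : (if mask.length ≠ 0 then ((mask.headD []).length : Int) else 0)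
      = (((if mask.length ≠ 0 then ((mask.headD []).length : Int) else 0).toNat : Nat) : Int) :=
    (Int.toNat_of_nonneg hw0).symm
  set w : Int := if mask.length ≠ 0 then ((mask.headD []).length : Int) else 0 with hwdef
  set W : Nat := w.toNat with hWdef
  set H : Nat := mask.length with hHdef
  have hscan := pvScan_inv mask min_area H W hHdef.symm
    (((PySem.List.pyRange 0 (H : Int) 1).flatMap (fun y =>
        (PySem.List.pyRange 0 (W : Int) 1).map (fun x => (x, y)))))
    (List.replicate H (List.replicate W 0))
    (List.replicate H (List.replicate W false))
    (List.replicate H (List.replicate W (-1))) []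
    (pvCellsInG H W) (pvInv_init mask min_area H W)
  rw [← hwW] at hscan
  obtain ⟨hOr, _hVr, _hLr, _hE, _hL, hO⟩ := hscan
  apply List.ext_getElem
  · rw [hOr.1]
    simp [PySem.List.length_pyRange_one]
  · intro i h1 h2
    rw [List.getElem_map, PySem.List.getElem_pyRange_one]
    apply List.ext_getElem
    · rw [hOr.2 _ (List.getElem_mem h1)]
      simp [PySem.List.length_pyRange_one, hWdef]
    · intro j hj1 hj2
      rw [List.getElem_map, PySem.List.getElem_pyRange_one]
      have hiH : i < H := by rw [← hOr.1]; exact h1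
      have hjW : j < W := by rw [← hOr.2 _ (List.getElem_mem h1)]; exact hj1
      have hzG : pvInG H W ((j : Int), (i : Int)) :=
        ⟨by omega, by omega, by omega, by omega⟩
      have hOz := hO ((j : Int), (i : Int)) hzG
      rw [← pvGet2_elem 0 hOr hiH hjW h1 hj1]
      rw [hOz]
      simp only [zero_add]
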